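-- pv_equiv track=rewrite | github.com/biobenkj/tranquillyzer | scripts/extract_annotated_seqs.py | collapse_labels
-- ===== SOURCE A (Python) =====
-- def collapse_labels(arr, read_length):
--     read = arr[0:read_length]
--     collapsed_array = []
--     count_dict = {}
--     indices_dict = {}
--     prev = None
--     start_index = 0
--
--     for i, element in enumerate(read):
--         if element != prev:
--             if prev is not None:
--                 collapsed_array.append(prev)
--                 count_dict[prev] = count_dict.get(prev, 0) + 1
--                 indices_dict[prev] = indices_dict.get(prev, []) + [(start_index, i - 1)]
--             prev = element
--             start_index = i
--
--     if prev is not None: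
--         collapsed_array.append(prev)
--         count_dict[prev] = count_dict.get(prev, 0) + 1
--         indices_dict[prev] = indices_dict.get(prev, []) + [(start_index, len(read) - 1)]
--
--     return collapsed_array, count_dict, indices_dict
-- ===== SOURCE B (Python) =====
-- def collapse_labels(arr, read_length):
--     read = arr[0:read_length]
--     n = len(read)
--     runs = []
--     i = 0
--     while i < n:
--         j = i
--         while j + 1 < n and read[j + 1] == read[i]:
--             j += 1
--         runs.append((read[i], i, j))
--         i = j + 1
--     collapsed_array = [lab for lab, _, _ in runs]
--     count_dict = {}
--     indices_dict = {}
--     for lab, s, e in runs: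
--         count_dict[lab] = count_dict.get(lab, 0) + 1
--         indices_dict.setdefault(lab, []).append((s, e))
--     return collapsed_array, count_dict, indices_dict
-- ===== Notes on version B (the rewrite author's own statement) =====
-- stated objective: alternative
-- what changed: Replaced A's one-pass prev/start_index state machine (flushing a run whenever the label changes, plus a duplicated final flush) by a two-phase algorithm: first segment the read into explicit runs (label, start, end) with a nested scan, then derive the collapsed list, counts and index ranges from the run list in one aggregation pass with no special final case.
import Mathlib
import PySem

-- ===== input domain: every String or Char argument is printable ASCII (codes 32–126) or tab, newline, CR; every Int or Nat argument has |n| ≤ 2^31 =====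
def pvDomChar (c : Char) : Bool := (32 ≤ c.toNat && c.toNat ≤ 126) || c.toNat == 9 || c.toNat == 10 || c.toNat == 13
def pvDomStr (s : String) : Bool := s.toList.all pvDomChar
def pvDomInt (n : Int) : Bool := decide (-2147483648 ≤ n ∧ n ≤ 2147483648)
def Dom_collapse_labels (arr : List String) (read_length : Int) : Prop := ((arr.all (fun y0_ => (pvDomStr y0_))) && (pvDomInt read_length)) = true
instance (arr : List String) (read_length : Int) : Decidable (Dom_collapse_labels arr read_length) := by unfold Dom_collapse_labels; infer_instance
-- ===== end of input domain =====

-- B replaces A's one-pass prev/start_index state machine by run segmentation followed by an aggregation pass (objective: alternative decomposition).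

-- ===== PORT A =====
-- A's for-loop over enumerate(read): structural recursion carrying the same state
-- (collapsed_array, count_dict, indices_dict, prev, start_index); i is the enumerate index.
def aLoop (l : List String) (i : Int) (c : List String)
    (cd : PySem.Dict String Int) (idd : PySem.Dict String (List (Int × Int)))
    (prev : Option String) (s : Int) :
    List String × PySem.Dict String Int × PySem.Dict String (List (Int × Int)) × Option String × Int :=
  match l with
  | [] => (c, cd, idd, prev, s)
  | e :: rest =>
    if some e = prev then
      aLoop rest (i + 1) c cd idd prev s
    else
      match prev with
      | some p =>
          aLoop rest (i + 1) (c ++ [p]) (cd.insert p (cd.getD p 0 + 1))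
            (idd.insert p (idd.getD p [] ++ [(s, i - 1)])) (some e) i
      | none => aLoop rest (i + 1) c cd idd (some e) i

-- the final `if prev is not None:` flush; n = len(read)
def aFinish (n : Int)
    (st : List String × PySem.Dict String Int × PySem.Dict String (List (Int × Int)) × Option String × Int) :
    List String × (List (String × Int)) × (List (String × List (Int × Int))) :=
  match st with
  | (c, cd, idd, none, _) => (c, cd.items, idd.items)
  | (c, cd, idd, some p, s) =>
      (c ++ [p], (cd.insert p (cd.getD p 0 + 1)).items,
       (idd.insert p (idd.getD p [] ++ [(s, n - 1)])).items)

def collapse_labels (arr : List String) (read_length : Int) : List String × (List (String × Int)) × (List (String × List (Int × Int))) :=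
  let read := PySem.List.slice arr (some 0) (some read_length)
  aFinish (read.length : Int) (aLoop read 0 [] PySem.Dict.empty PySem.Dict.empty none 0)

-- ===== PORT B =====
-- inner while: number of leading elements of l equal to x
def runTail (x : String) (l : List String) : Nat :=
  match l with
  | [] => 0
  | y :: ys => if y == x then runTail x ys + 1 else 0

-- outer while: the list of runs (label, start index, end index)
def runsFrom (l : List String) (i : Int) : List (String × Int × Int) :=
  match l with
  | [] => []
  | x :: xs =>
    let k := runTail x xs
    (x, i, i + (k : Int)) :: runsFrom (xs.drop k) (i + (k : Int) + 1)
termination_by l.length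
decreasing_by
  simp only [List.length_cons, List.length_drop]; omega

-- the aggregation pass over the run list (count_dict / indices_dict updates)
def bStep (d : PySem.Dict String Int × PySem.Dict String (List (Int × Int)))
    (r : String × Int × Int) :
    PySem.Dict String Int × PySem.Dict String (List (Int × Int)) :=
  (d.1.insert r.1 (d.1.getD r.1 0 + 1),
   d.2.insert r.1 (d.2.getD r.1 [] ++ [(r.2.1, r.2.2)]))

def collapse_labels_alt (arr : List String) (read_length : Int) : List String × (List (String × Int)) × (List (String × List (Int × Int))) :=
  let read := PySem.List.slice arr (some 0) (some read_length)
  let runs := runsFrom read 0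
  let d := runs.foldl bStep (PySem.Dict.empty, PySem.Dict.empty)
  (runs.map (fun r => r.1), d.1.items, d.2.items)

-- ===== PRECONDITION & SPEC =====
def Spec_collapse_labels (arr : List String) (read_length : Int) (out : List String × (List (String × Int)) × (List (String × List (Int × Int)))) : Prop := out = collapse_labels_alt arr read_length
instance (arr : List String) (read_length : Int) (out : List String × (List (String × Int)) × (List (String × List (Int × Int)))) : Decidable (Spec_collapse_labels arr read_length out) := by unfold Spec_collapse_labels; infer_instance

-- ===== CLAIM (what is proved, stated in full; the proofs are below) =====
def Claim_equal_collapse_labels : Prop := ∀ (arr : List String) (read_length : Int), Dom_collapse_labels arr read_length → Spec_collapse_labels arr read_length (collapse_labels arr read_length)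

-- ===== LEMMAS AND PROOFS =====

-- B's output shape, generalized over already-emitted prefix c and dict state d
def bOutFrom (c : List String)
    (d : PySem.Dict String Int × PySem.Dict String (List (Int × Int)))
    (R : List (String × Int × Int)) :
    List String × (List (String × Int)) × (List (String × List (Int × Int))) :=
  (c ++ R.map (fun r => r.1), (R.foldl bStep d).1.items, (R.foldl bStep d).2.items)

lemma bOutFrom_cons (c : List String) (d : PySem.Dict String Int × PySem.Dict String (List (Int × Int)))
    (r : String × Int × Int) (R : List (String × Int × Int)) :
    bOutFrom c d (r :: R) = bOutFrom (c ++ [r.1]) (bStep d r) R := by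
  simp [bOutFrom]

-- main invariant: from a state in the middle of a run of x started at s, A's
-- remaining loop + final flush produce exactly B's run-based output
lemma aLoop_runs (l : List String) : ∀ (i s : Int) (c : List String)
    (cd : PySem.Dict String Int) (idd : PySem.Dict String (List (Int × Int))) (x : String),
    aFinish (i + (l.length : Int)) (aLoop l i c cd idd (some x) s)
      = bOutFrom c (cd, idd)
          ((x, s, i + (runTail x l : Int) - 1) :: runsFrom (l.drop (runTail x l)) (i + (runTail x l : Int))) := by
  induction l with
  | nil =>
    intro i s c cd idd x
    simp [aLoop, aFinish, runTail, runsFrom, bOutFrom, bStep]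
  | cons e rest ih =>
    intro i s c cd idd x
    by_cases he : e = x
    · subst he
      have hk : runTail e (e :: rest) = runTail e rest + 1 := by simp [runTail]
      have hskip : aLoop (e :: rest) i c cd idd (some e) s
          = aLoop rest (i + 1) c cd idd (some e) s := by
        simp [aLoop]
      rw [hskip, hk]
      have hlen : i + ((e :: rest).length : Int) = (i + 1) + (rest.length : Int) := by
        push_cast [List.length_cons]; ring
      rw [hlen, ih (i + 1) s c cd idd e]
      have h1 : (i + 1) + (runTail e rest : Int) - 1 = i + ((runTail e rest + 1 : Nat) : Int) - 1 := by
        push_cast; ring_nf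
      have h2 : (i + 1) + (runTail e rest : Int) = i + ((runTail e rest + 1 : Nat) : Int) := by
        push_cast; ring_nf
      rw [h1, h2, List.drop_succ_cons]
    · have hk : runTail x (e :: rest) = 0 := by
        simp [runTail, he]
      have hflush : aLoop (e :: rest) i c cd idd (some x) s
          = aLoop rest (i + 1) (c ++ [x]) (cd.insert x (cd.getD x 0 + 1))
              (idd.insert x (idd.getD x [] ++ [(s, i - 1)])) (some e) i := by
        simp [aLoop, he]
      rw [hflush, hk]
      have hlen : i + ((e :: rest).length : Int) = (i + 1) + (rest.length : Int) := by
        push_cast [List.length_cons]; ring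
      rw [hlen, ih (i + 1) i (c ++ [x]) _ _ e]
      -- peel the (x, s, i-1) run off the RHS
      have hrhs : bOutFrom c (cd, idd)
            ((x, s, i + ((0 : Nat) : Int) - 1) :: runsFrom ((e :: rest).drop 0) (i + ((0 : Nat) : Int)))
          = bOutFrom (c ++ [x])
              (cd.insert x (cd.getD x 0 + 1), idd.insert x (idd.getD x [] ++ [(s, i - 1)]))
              (runsFrom (e :: rest) i) := by
        rw [bOutFrom_cons]
        simp [bStep]
      rw [hrhs]
      have hr : runsFrom (e :: rest) i
          = (e, i, i + (runTail e rest : Int)) :: runsFrom (rest.drop (runTail e rest)) (i + (runTail e rest : Int) + 1) := by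
        rw [runsFrom]
      rw [hr]
      congr 2 <;> ring_nf

lemma core (read : List String) :
    aFinish (read.length : Int) (aLoop read 0 [] PySem.Dict.empty PySem.Dict.empty none 0)
      = (let runs := runsFrom read 0
         let d := runs.foldl bStep (PySem.Dict.empty, PySem.Dict.empty)
         (runs.map (fun r => r.1), d.1.items, d.2.items)) := by
  cases read with
  | nil => simp [aLoop, aFinish, runsFrom, PySem.Dict.empty]
  | cons x xs =>
    have hstart : aLoop (x :: xs) 0 [] PySem.Dict.empty PySem.Dict.empty none 0
        = aLoop xs 1 [] PySem.Dict.empty PySem.Dict.empty (some x) 0 := by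
      simp [aLoop]
    have hlen : (((x :: xs).length : Nat) : Int) = 1 + (xs.length : Int) := by
      push_cast [List.length_cons]; ring
    rw [hstart, hlen, aLoop_runs xs 1 0 [] PySem.Dict.empty PySem.Dict.empty x]
    have hr : runsFrom (x :: xs) 0
        = (x, 0, 0 + (runTail x xs : Int)) :: runsFrom (xs.drop (runTail x xs)) (0 + (runTail x xs : Int) + 1) := by
      rw [runsFrom]
    have e1 : (0 : Int) + (runTail x xs : Int) = 1 + (runTail x xs : Int) - 1 := by ring
    have e2 : (0 : Int) + (runTail x xs : Int) + 1 = 1 + (runTail x xs : Int) := by ring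
    rw [hr, e2, e1]
    simp [bOutFrom]

-- ===== VERDICT (by name: the statement is the Claim_ definition above) =====
theorem collapse_labels_spec : Claim_equal_collapse_labels := by
  intro arr read_length _h
  unfold Spec_collapse_labels collapse_labels collapse_labels_alt
  exact core (PySem.List.slice arr (some 0) (some read_length))
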